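-- pv_equiv track=rewrite | github.com/MikhailPimenov/Algorithms-and-data-structures-Python | lecture23/adjacency_lists_compact_storage/adjacency_lists_compact_storage5.py | adjacency_lists_compact_storage5
-- ===== SOURCE A (Python) =====
-- def adjacency_lists_compact_storage5(vertexes: list, lists: list) -> tuple:
--     start_index = 0
--     compact_lists = []
--     indexes = [0]
--
--     for adjacency_list in lists:
--         for neighbor in adjacency_list:
--             compact_lists.append(neighbor)
--             start_index += 1
--
--         indexes.append(start_index)
--
--     return vertexes, indexes, compact_lists
-- ===== SOURCE B (Python) =====
-- def adjacency_lists_compact_storage5(vertexes: list, lists: list) -> tuple: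
--     def build(ls):
--         # recursion on the suffix: indexes of the tail shifted by len(head)
--         if not ls:
--             return [0], []
--         tail_indexes, tail_flat = build(ls[1:])
--         n = len(ls[0])
--         return [0] + [i + n for i in tail_indexes], ls[0] + tail_flat
--     indexes, compact_lists = build(lists)
--     return vertexes, indexes, compact_lists
-- ===== Notes on version B (the rewrite author's own statement) =====
-- stated objective: alternative
-- what changed: Replaced A's single forward pass with a running start_index counter by a recursion on the list-of-lists that builds both outputs back-to-front, shifting the tail's index array by the head's length (no counter at all).
import Mathlib
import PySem

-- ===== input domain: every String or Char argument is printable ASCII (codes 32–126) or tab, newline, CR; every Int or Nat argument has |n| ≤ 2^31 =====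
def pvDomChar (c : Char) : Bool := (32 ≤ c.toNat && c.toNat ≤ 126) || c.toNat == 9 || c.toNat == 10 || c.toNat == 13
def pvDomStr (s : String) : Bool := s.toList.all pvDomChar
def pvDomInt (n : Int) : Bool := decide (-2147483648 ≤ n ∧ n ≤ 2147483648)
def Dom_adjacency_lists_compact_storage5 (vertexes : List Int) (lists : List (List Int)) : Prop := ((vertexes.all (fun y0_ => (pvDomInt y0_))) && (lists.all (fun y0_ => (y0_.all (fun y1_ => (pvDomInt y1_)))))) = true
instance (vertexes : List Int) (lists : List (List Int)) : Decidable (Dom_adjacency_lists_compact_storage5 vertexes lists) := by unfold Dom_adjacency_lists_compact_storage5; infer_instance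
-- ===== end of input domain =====

-- B replaces A's forward running-counter pass by a recursion on the suffix that builds both
-- outputs back-to-front, shifting the tail's index array by the head's length (alternative).

-- ===== PORT A =====
-- literal port of A: one fold over `lists`, state = (start_index, compact_lists, indexes),
-- inner fold over each adjacency_list appending neighbors and incrementing start_index
def adjacency_lists_compact_storage5 (vertexes : List Int) (lists : List (List Int)) : List Int × List Int × List Int :=
  let res := lists.foldl
    (fun (st : Int × List Int × List Int) adjacency_list =>
      let st2 := adjacency_list.foldl
        (fun (p : Int × List Int) neighbor => (p.1 + 1, p.2 ++ [neighbor])) (st.1, st.2.1)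
      (st2.1, st2.2, st.2.2 ++ [st2.1])) (0, [], [0])
  (vertexes, res.2.2, res.2.1)

-- ===== PORT B =====
-- literal port of Source B's inner `build`: recursion on the suffix,
-- tail indexes shifted by len(head), head prepended to the tail flattening
def pvBuild : List (List Int) → List Int × List Int
  | [] => ([0], [])
  | head :: rest =>
    let t := pvBuild rest
    ((0 : Int) :: t.1.map (fun i => i + (head.length : Int)), head ++ t.2)

def adjacency_lists_compact_storage5_alt (vertexes : List Int) (lists : List (List Int)) : List Int × List Int × List Int :=
  let r := pvBuild lists
  (vertexes, r.1, r.2)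

-- ===== PRECONDITION & SPEC =====
def Spec_adjacency_lists_compact_storage5 (vertexes : List Int) (lists : List (List Int)) (out : List Int × List Int × List Int) : Prop := out = adjacency_lists_compact_storage5_alt vertexes lists
instance (vertexes : List Int) (lists : List (List Int)) (out : List Int × List Int × List Int) : Decidable (Spec_adjacency_lists_compact_storage5 vertexes lists out) := by unfold Spec_adjacency_lists_compact_storage5; infer_instance

-- ===== CLAIM (what is proved, stated in full; the proofs are below) =====
def Claim_equal_adjacency_lists_compact_storage5 : Prop := ∀ (vertexes : List Int) (lists : List (List Int)), Dom_adjacency_lists_compact_storage5 vertexes lists → Spec_adjacency_lists_compact_storage5 vertexes lists (adjacency_lists_compact_storage5 vertexes lists)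

-- ===== LEMMAS AND PROOFS =====

-- proof-only helper: the running-sum characterisation both ports meet
def pvAcc (acc : Int) : List Int → List Int
  | [] => []
  | x :: xs => (acc + x) :: pvAcc (acc + x) xs

theorem pvAcc_map_add (xs : List Int) (a s : Int) :
    (pvAcc a xs).map (fun i => i + s) = pvAcc (a + s) xs := by
  induction xs generalizing a with
  | nil => simp [pvAcc]
  | cons x t ih =>
      simp only [pvAcc, List.map_cons, ih]
      have h : a + x + s = a + s + x := by ring
      rw [h]

theorem pvBuild_eq (lists : List (List Int)) :
    pvBuild lists = (0 :: pvAcc 0 (lists.map (fun al => (al.length : Int))), lists.flatten) := by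
  induction lists with
  | nil => simp [pvBuild, pvAcc]
  | cons head rest ih =>
      simp only [pvBuild, ih, List.map_cons, List.flatten_cons, List.map]
      refine Prod.ext ?_ (by simp)
      simp [pvAcc, pvAcc_map_add]

theorem inner_foldl (al : List Int) (s : Int) (c : List Int) :
    al.foldl (fun (p : Int × List Int) neighbor => (p.1 + 1, p.2 ++ [neighbor])) (s, c)
      = (s + al.length, c ++ al) := by
  induction al generalizing s c with
  | nil => simp
  | cons x xs ih => simp [List.foldl, ih]; omega

theorem outer_foldl (lists : List (List Int)) (s : Int) (c idx : List Int) :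
    lists.foldl
      (fun (st : Int × List Int × List Int) adjacency_list =>
        let st2 := adjacency_list.foldl
          (fun (p : Int × List Int) neighbor => (p.1 + 1, p.2 ++ [neighbor])) (st.1, st.2.1)
        (st2.1, st2.2, st.2.2 ++ [st2.1])) (s, c, idx)
      = (s + ((lists.map (fun al => (al.length : Int))).sum),
         c ++ lists.flatten,
         idx ++ pvAcc s (lists.map (fun al => (al.length : Int)))) := by
  induction lists generalizing s c idx with
  | nil => simp [pvAcc]
  | cons al rest ih =>
      have hstep : (fun (st : Int × List Int × List Int) adjacency_list =>
          let st2 := adjacency_list.foldl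
            (fun (p : Int × List Int) neighbor => (p.1 + 1, p.2 ++ [neighbor])) (st.1, st.2.1)
          (st2.1, st2.2, st.2.2 ++ [st2.1])) (s, c, idx) al
          = (s + (al.length : Int), c ++ al, idx ++ [s + (al.length : Int)]) := by
        simp [inner_foldl]
      simp only [List.foldl_cons, hstep, ih, List.map_cons, List.flatten_cons, pvAcc,
        List.sum_cons]
      simp only [Prod.mk.injEq]
      refine ⟨by ring, by simp, by simp⟩

-- ===== VERDICT (by name: the statement is the Claim_ definition above) =====
theorem adjacency_lists_compact_storage5_spec : Claim_equal_adjacency_lists_compact_storage5 := by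
  intro vertexes lists _
  unfold Spec_adjacency_lists_compact_storage5 adjacency_lists_compact_storage5
    adjacency_lists_compact_storage5_alt
  simp [outer_foldl, pvBuild_eq]
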